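-- pv_equiv track=rewrite | github.com/scott-kihong/laftel | numbers_to_string.py | numbers_to_string
-- ===== SOURCE A (Python) =====
-- from typing import List
--
-- def numbers_to_string(numbers: List[int]) -> str:
--     ret = []
--     tmp = []
--
--     length = len(numbers)
--     for i in range(length - 1):
--         if numbers[i+1] - numbers[i] > 1:
--             tmp.append(numbers[i])
--             ret.append(tmp)
--             tmp = []
--             continue
--         tmp.append(numbers[i])
--
--     tmp.append(numbers[length-1])
--     ret.append(tmp)
--
--     return ', '.join([f'{r[0]}~{r[-1]}' if len(r) > 1 else f'{r[0]}' for r in ret])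
-- ===== SOURCE B (Python) =====
-- from typing import List
--
-- def numbers_to_string(numbers: List[int]) -> str:
--     n = len(numbers)
--     breaks = [i for i in range(n - 1) if numbers[i + 1] - numbers[i] > 1]
--     starts = [0] + [b + 1 for b in breaks]
--     ends = [b + 1 for b in breaks] + [n]
--     parts = []
--     for s, e in zip(starts, ends):
--         seg = numbers[s:e]
--         parts.append(f'{seg[0]}~{seg[-1]}' if e - s > 1 else f'{seg[0]}')
--     return ', '.join(parts)
-- ===== Notes on version B (the rewrite author's own statement) =====
-- stated objective: alternative
-- what changed: Replaces A's single stateful loop that accumulates a list of run-lists (ret/tmp) by a two-phase scheme: first collect the break indices where the gap exceeds 1, then slice the list along those boundaries and format each slice from its endpoints.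
import Mathlib
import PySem

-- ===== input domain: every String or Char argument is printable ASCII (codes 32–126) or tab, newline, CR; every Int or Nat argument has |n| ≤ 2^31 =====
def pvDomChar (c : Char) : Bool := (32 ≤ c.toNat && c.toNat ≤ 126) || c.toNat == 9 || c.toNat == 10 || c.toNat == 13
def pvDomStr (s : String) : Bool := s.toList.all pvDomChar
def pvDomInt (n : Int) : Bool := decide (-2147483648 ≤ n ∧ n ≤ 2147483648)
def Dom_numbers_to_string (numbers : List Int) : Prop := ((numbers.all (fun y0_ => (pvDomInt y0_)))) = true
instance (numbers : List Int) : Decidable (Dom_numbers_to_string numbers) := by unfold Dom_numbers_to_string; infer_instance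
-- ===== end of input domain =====

-- B replaces A's stateful run-list accumulation by break-index collection plus slicing (objective: alternative).

-- ===== PORT A =====
def numbers_to_string (numbers : List Int) : String :=
  let length : Int := PySem.List.len numbers
  let st := (PySem.List.pyRange 0 (length - 1) 1).foldl
    (fun (st : List (List Int) × List Int) i =>
      if PySem.List.pyGetD numbers (i + 1) 0 - PySem.List.pyGetD numbers i 0 > 1 then
        (st.1 ++ [st.2 ++ [PySem.List.pyGetD numbers i 0]], ([] : List Int))
      else
        (st.1, st.2 ++ [PySem.List.pyGetD numbers i 0]))
    ([], [])
  let tmp := st.2 ++ [PySem.List.pyGetD numbers (length - 1) 0]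
  let ret := st.1 ++ [tmp]
  PySem.Str.join ", " (ret.map (fun r =>
    if PySem.List.len r > 1 then
      PySem.Int.toStr (PySem.List.pyGetD r 0 0) ++ "~" ++ PySem.Int.toStr (PySem.List.pyGetD r (-1) 0)
    else
      PySem.Int.toStr (PySem.List.pyGetD r 0 0)))

-- ===== PORT B =====
def numbers_to_string_alt (numbers : List Int) : String :=
  let n : Int := PySem.List.len numbers
  let breaks := (PySem.List.pyRange 0 (n - 1) 1).filter
    (fun i => PySem.List.pyGetD numbers (i + 1) 0 - PySem.List.pyGetD numbers i 0 > 1)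
  let starts := 0 :: breaks.map (fun b => b + 1)
  let ends := breaks.map (fun b => b + 1) ++ [n]
  let parts := (starts.zip ends).map (fun se =>
    let seg := PySem.List.slice numbers (some se.1) (some se.2)
    if se.2 - se.1 > 1 then
      PySem.Int.toStr (PySem.List.pyGetD seg 0 0) ++ "~" ++ PySem.Int.toStr (PySem.List.pyGetD seg (-1) 0)
    else
      PySem.Int.toStr (PySem.List.pyGetD seg 0 0))
  PySem.Str.join ", " parts

-- ===== PRECONDITION & SPEC =====
-- Pre_ excludes only the empty list, on which the Python A raises IndexError (numbers[length-1]).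
def Pre_numbers_to_string (numbers : List Int) : Prop := numbers ≠ []
instance (numbers : List Int) : Decidable (Pre_numbers_to_string numbers) := by
  unfold Pre_numbers_to_string; infer_instance
def pvWitness_numbers_to_string : List Int := [1, 2, 5]

def Spec_numbers_to_string (numbers : List Int) (out : String) : Prop := out = numbers_to_string_alt numbers
instance (numbers : List Int) (out : String) : Decidable (Spec_numbers_to_string numbers out) := by unfold Spec_numbers_to_string; infer_instance

-- ===== CLAIM (what is proved, stated in full; the proofs are below) =====
def Claim_equal_numbers_to_string : Prop := ∀ (numbers : List Int), Dom_numbers_to_string numbers → Pre_numbers_to_string numbers → Spec_numbers_to_string numbers (numbers_to_string numbers)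

-- ===== LEMMAS AND PROOFS =====

-- element at a Nat index
def pvG (xs : List Int) (i : Nat) : Int := xs.getD i 0
-- the break test between positions i and i+1
def pvBrk (xs : List Int) (i : Nat) : Bool := decide (pvG xs (i + 1) - pvG xs i > 1)
-- the segment xs[s:e] at Nat bounds
def pvSeg (xs : List Int) (s e : Nat) : List Int := (xs.drop s).take (e - s)
-- the closed segments determined by a break list, starting at s
def pvSegsFrom (xs : List Int) (s : Nat) : List Nat → List (List Int)
  | [] => []
  | b :: bs => pvSeg xs s (b + 1) :: pvSegsFrom xs (b + 1) bs
-- the start of the open (last) segment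
def pvLastStart (s : Nat) : List Nat → Nat
  | [] => s
  | b :: bs => pvLastStart (b + 1) bs
-- break indices among the first m gaps
def pvBks (xs : List Int) (m : Nat) : List Nat := (List.range m).filter (pvBrk xs)
-- A's loop body over a Nat index
def pvStep (xs : List Int) (st : List (List Int) × List Int) (k : Nat) : List (List Int) × List Int :=
  if pvG xs (k + 1) - pvG xs k > 1 then (st.1 ++ [st.2 ++ [pvG xs k]], []) else (st.1, st.2 ++ [pvG xs k])
-- A's per-segment formatter
def pvFmtA (r : List Int) : String :=
  if PySem.List.len r > 1 then
    PySem.Int.toStr (PySem.List.pyGetD r 0 0) ++ "~" ++ PySem.Int.toStr (PySem.List.pyGetD r (-1) 0)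
  else
    PySem.Int.toStr (PySem.List.pyGetD r 0 0)
-- B's per-boundary formatter
def pvFmtB (xs : List Int) (se : Int × Int) : String :=
  let seg := PySem.List.slice xs (some se.1) (some se.2)
  if se.2 - se.1 > 1 then
    PySem.Int.toStr (PySem.List.pyGetD seg 0 0) ++ "~" ++ PySem.Int.toStr (PySem.List.pyGetD seg (-1) 0)
  else
    PySem.Int.toStr (PySem.List.pyGetD seg 0 0)

lemma pvLastStart_le {m : Nat} : ∀ (bs : List Nat) (p : Nat), (∀ b ∈ bs, b < m) → p ≤ m → pvLastStart p bs ≤ m := by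
  intro bs
  induction bs with
  | nil => intro p _ hp; exact hp
  | cons b bs ih =>
    intro p h _
    exact ih (b + 1) (fun x hx => h x (List.mem_cons_of_mem _ hx)) (h b List.mem_cons_self)

lemma pvSeg_snoc (xs : List Int) {s e : Nat} (hse : s ≤ e) (he : e < xs.length) :
    pvSeg xs s e ++ [pvG xs e] = pvSeg xs s (e + 1) := by
  unfold pvSeg pvG
  have h1 : e + 1 - s = (e - s) + 1 := by omega
  rw [h1, List.take_add_one, List.getElem?_drop]
  have h2 : s + (e - s) = e := by omega
  rw [h2, List.getElem?_eq_getElem he]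
  simp [List.getD_eq_getElem?_getD, List.getElem?_eq_getElem he]

lemma pvSegsFrom_snoc (xs : List Int) (b : Nat) : ∀ (bs : List Nat) (s : Nat),
    pvSegsFrom xs s (bs ++ [b]) = pvSegsFrom xs s bs ++ [pvSeg xs (pvLastStart s bs) (b + 1)] := by
  intro bs
  induction bs with
  | nil => intro s; rfl
  | cons c bs ih => intro s; simp [pvSegsFrom, pvLastStart, ih]

lemma pvLastStart_snoc (b : Nat) : ∀ (bs : List Nat) (s : Nat), pvLastStart s (bs ++ [b]) = b + 1 := by
  intro bs
  induction bs with
  | nil => intro s; rfl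
  | cons c bs ih => intro s; simp [pvLastStart, ih]

lemma pvBks_lt (xs : List Int) (m : Nat) : ∀ b ∈ pvBks xs m, b < m := by
  intro b hb
  exact List.mem_range.mp (List.mem_filter.mp hb).1

-- the A-loop invariant
lemma pvLoopA (xs : List Int) : ∀ (m : Nat), m ≤ xs.length →
    (List.range m).foldl (pvStep xs) ([], []) =
      (pvSegsFrom xs 0 (pvBks xs m), pvSeg xs (pvLastStart 0 (pvBks xs m)) m) := by
  intro m
  induction m with
  | zero => intro _; simp [pvBks, pvSegsFrom, pvLastStart, pvSeg]
  | succ m ih =>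
    intro h
    have hm : m < xs.length := by omega
    have hls : pvLastStart 0 (pvBks xs m) ≤ m :=
      pvLastStart_le (pvBks xs m) 0 (pvBks_lt xs m) (Nat.zero_le m)
    rw [List.range_succ, List.foldl_append, ih (by omega)]
    have hbks : pvBks xs (m + 1) = pvBks xs m ++ if pvBrk xs m then [m] else [] := by
      simp [pvBks, List.range_succ, List.filter_append, List.filter_singleton]
    by_cases hb : pvG xs (m + 1) - pvG xs m > 1
    · have hbrk : pvBrk xs m = true := by simp [pvBrk, hb]
      rw [hbks, hbrk]
      simp only [List.foldl_cons, List.foldl_nil, if_true]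
      rw [pvSegsFrom_snoc, pvLastStart_snoc]
      simp [pvStep, hb, pvSeg_snoc xs hls hm]
      simp [pvSeg]
    · have hbrk : pvBrk xs m = false := by simp [pvBrk, hb]
      rw [hbks, hbrk]
      simp only [List.foldl_cons, List.foldl_nil]
      simp [pvStep, hb, pvSeg_snoc xs hls hm]

lemma pvFmt_eq (xs : List Int) (s e : Nat) (hse : s < e) (he : e ≤ xs.length) :
    pvFmtB xs ((s : Int), (e : Int)) = pvFmtA (pvSeg xs s e) := by
  unfold pvFmtB pvFmtA
  have hseg : PySem.List.slice xs (some (s : Int)) (some (e : Int)) = pvSeg xs s e := by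
    rw [PySem.List.slice_natCast]; rfl
  have hlen : PySem.List.len (pvSeg xs s e) = (e : Int) - (s : Int) := by
    have h1 : (pvSeg xs s e).length = e - s := by
      unfold pvSeg; simp; omega
    rw [PySem.List.len_eq, h1]
    omega
  simp only [hseg, hlen]

-- the zip-of-boundaries pass equals the segment map
lemma pvZipParts (xs : List Int) : ∀ (bs : List Nat) (s : Nat),
    bs.Pairwise (· < ·) → (∀ b ∈ bs, b < xs.length - 1) → (∀ b ∈ bs, s ≤ b) → s < xs.length →
    (((s : Int) :: bs.map (fun b => ((b : Nat) : Int) + 1)).zip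
        (bs.map (fun b => ((b : Nat) : Int) + 1) ++ [(xs.length : Int)])).map (pvFmtB xs)
      = (pvSegsFrom xs s bs ++ [pvSeg xs (pvLastStart s bs) xs.length]).map pvFmtA := by
  intro bs
  induction bs with
  | nil =>
    intro s _ _ _ hs
    simp [pvSegsFrom, pvLastStart]
    exact pvFmt_eq xs s xs.length hs le_rfl
  | cons b bs ih =>
    intro s hp hlt hsb hs
    have hb1 : b < xs.length - 1 := hlt b List.mem_cons_self
    have hsb' : s ≤ b := hsb b List.mem_cons_self
    have hcast : ((b : Int) + 1) = (((b + 1 : Nat) : Int)) := by push_cast; ring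
    simp only [List.map_cons, List.cons_append, List.zip_cons_cons, List.map_cons,
      pvSegsFrom, pvLastStart]
    rw [hcast]
    congr 1
    · exact pvFmt_eq xs s (b + 1) (by omega) (by omega)
    · exact ih (b + 1) (List.Pairwise.of_cons hp)
        (fun x hx => hlt x (List.mem_cons_of_mem _ hx))
        (fun x hx => (List.pairwise_cons.mp hp).1 x hx)
        (by omega)

-- port A reaches the segment characterisation
lemma pvPortA_eq (xs : List Int) (h : xs ≠ []) :
    numbers_to_string xs =
      PySem.Str.join ", "
        ((pvSegsFrom xs 0 (pvBks xs (xs.length - 1)) ++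
            [pvSeg xs (pvLastStart 0 (pvBks xs (xs.length - 1))) xs.length]).map pvFmtA) := by
  have hn : 0 < xs.length := List.length_pos_iff.mpr h
  unfold numbers_to_string
  simp only [PySem.List.len_eq]
  rw [PySem.List.pyRange_one]
  have ht : ((xs.length : Int) - 1 - 0).toNat = xs.length - 1 := by omega
  rw [ht, List.foldl_map]
  have hstep : (fun (st : List (List Int) × List Int) (k : Nat) =>
      (fun (st : List (List Int) × List Int) (i : Int) =>
        if PySem.List.pyGetD xs (i + 1) 0 - PySem.List.pyGetD xs i 0 > 1 then
          (st.1 ++ [st.2 ++ [PySem.List.pyGetD xs i 0]], ([] : List Int))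
        else
          (st.1, st.2 ++ [PySem.List.pyGetD xs i 0])) st ((0 : Int) + (k : Int))) = pvStep xs := by
    funext st k
    simp only [zero_add]
    rw [show ((k : Int) + 1) = (((k + 1 : Nat)) : Int) by push_cast; ring]
    simp only [pvStep, pvG, PySem.List.pyGetD_natCast]
  rw [hstep, pvLoopA xs (xs.length - 1) (by omega)]
  have hc2 : ((xs.length : Int) - 1) = (((xs.length - 1 : Nat)) : Int) := by omega
  rw [hc2]
  simp only [PySem.List.pyGetD_natCast]
  have hls : pvLastStart 0 (pvBks xs (xs.length - 1)) ≤ xs.length - 1 :=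
    pvLastStart_le _ 0 (pvBks_lt xs (xs.length - 1)) (Nat.zero_le _)
  have hsnoc := pvSeg_snoc xs (s := pvLastStart 0 (pvBks xs (xs.length - 1)))
    (e := xs.length - 1) hls (by omega)
  rw [show (pvG xs (xs.length - 1)) = xs.getD (xs.length - 1) 0 from rfl] at hsnoc
  rw [hsnoc, show xs.length - 1 + 1 = xs.length by omega]
  rfl

-- port B reaches the same characterisation
lemma pvPortB_eq (xs : List Int) (h : xs ≠ []) :
    numbers_to_string_alt xs =
      PySem.Str.join ", "
        ((pvSegsFrom xs 0 (pvBks xs (xs.length - 1)) ++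
            [pvSeg xs (pvLastStart 0 (pvBks xs (xs.length - 1))) xs.length]).map pvFmtA) := by
  have hn : 0 < xs.length := List.length_pos_iff.mpr h
  unfold numbers_to_string_alt
  simp only [PySem.List.len_eq]
  rw [PySem.List.pyRange_one]
  have ht : ((xs.length : Int) - 1 - 0).toNat = xs.length - 1 := by omega
  rw [ht, List.filter_map]
  have hcond : ((fun (i : Int) =>
      PySem.List.pyGetD xs (i + 1) 0 - PySem.List.pyGetD xs i 0 > 1 : Int → Bool) ∘
        (fun (k : Nat) => (0 : Int) + (k : Int))) = pvBrk xs := by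
    funext k
    simp only [Function.comp, zero_add]
    rw [show ((k : Int) + 1) = (((k + 1 : Nat)) : Int) by push_cast; ring]
    simp only [pvBrk, pvG, PySem.List.pyGetD_natCast]
    rfl
  rw [hcond]
  rw [List.map_map]
  have hmm : ((fun (b : Int) => b + 1) ∘ (fun (k : Nat) => (0 : Int) + (k : Int))) =
      (fun (b : Nat) => ((b : Nat) : Int) + 1) := by
    funext k; simp
  rw [hmm]
  have hz := pvZipParts xs (pvBks xs (xs.length - 1)) 0
    (List.Pairwise.filter _ (List.pairwise_lt_range))
    (pvBks_lt xs (xs.length - 1)) (fun b _ => Nat.zero_le b) hn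
  simp only [Nat.cast_zero] at hz
  exact congrArg (PySem.Str.join ", ") hz

-- ===== VERDICT (by name: the statement is the Claim_ definition above) =====
theorem numbers_to_string_spec : Claim_equal_numbers_to_string := by
  intro xs _ hne
  unfold Spec_numbers_to_string
  rw [pvPortA_eq xs hne, pvPortB_eq xs hne]
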